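-- pv_equiv track=rewrite | github.com/GSA-TTS/10x-usagov-wrangler | utils/utils.py | url_to_sanitized_base_no_ext
-- ===== SOURCE A (Python) =====
-- def url_to_sanitized_base_no_ext(url: str) -> str:
--     """
--     Converts a URL to a sanitized string suitable for use as a base filename (without extension).
--     This is an internal helper function.
--     """
--     filename = url
--
--     # Order of these initial prefix replacements matters
--     if filename.startswith("https://www."):
--         filename = "https_www_" + filename[len("https://www.") :]
--     elif filename.startswith("http://www."):
--         filename = "http_www_" + filename[len("http://www.") :]
--     elif filename.startswith("https://"):
--         filename = "https_" + filename[len("https://") :]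
--     elif filename.startswith("http://"):
--         filename = "http_" + filename[len("http://") :]
--     # Add other schemes like ftp_ if necessary
--
--     # Define character replacements for filesystem safety and reversibility
--     # Using distinct placeholders ensures reliable reversal.
--     replacements = {
--         "/": "_SLASH_",
--         "?": "_QUERY_",
--         "=": "_EQ_",
--         "&": "_AMP_",
--         "%": "_PCT_",
--         ".": "_DOT_",
--         ":": "_COLON_",  # Handles colons in ports or other parts of URL
--         "\\": "_BACKSLASH_",
--         "*": "_STAR_",
--         '"': "_QUOTE_",
--         "<": "_LT_",
--         ">": "_GT_",
--         "|": "_PIPE_",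
--     }
--     for char, replacement_token in replacements.items():
--         filename = filename.replace(char, replacement_token)
--
--     # Note: OS filename length limits (e.g., 255 bytes/chars on many systems)
--     # could be an issue for extremely long URLs. For typical usa.gov URLs,
--     # this should not be a problem. If it were, a hashing mechanism for
--     # overly long names might be needed, which would complicate reversal.
--
--     return filename
-- ===== SOURCE B (Python) =====
-- def url_to_sanitized_base_no_ext(url: str) -> str:
--     # Prefix normalization driven by an ordered table scanned with a
--     # first-match loop (same order as A's if/elif chain, so same behaviour).
--     prefixes = [
--         ("https://www.", "https_www_"),
--         ("http://www.", "http_www_"),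
--         ("https://", "https_"),
--         ("http://", "http_"),
--     ]
--     filename = url
--     for pre, rep in prefixes:
--         if filename.startswith(pre):
--             filename = rep + filename[len(pre):]
--             break
--
--     # One left-to-right scan replacing each character simultaneously; exact
--     # because no replacement token contains any replaced character.
--     table = {
--         "/": "_SLASH_",
--         "?": "_QUERY_",
--         "=": "_EQ_",
--         "&": "_AMP_",
--         "%": "_PCT_",
--         ".": "_DOT_",
--         ":": "_COLON_",
--         "\\": "_BACKSLASH_",
--         "*": "_STAR_",
--         '"': "_QUOTE_",
--         "<": "_LT_",
--         ">": "_GT_",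
--         "|": "_PIPE_",
--     }
--     out = []
--     for ch in filename:
--         out.extend(table.get(ch, ch))
--     return "".join(out)
-- ===== Notes on version B (the rewrite author's own statement) =====
-- stated objective: alternative
-- what changed: A's if/elif prefix chain becomes a first-match scan over an ordered (prefix, replacement) table, and the 13 sequential full-string str.replace passes become one left-to-right character scan accumulating table.get(ch, ch) into a char list (exact because no replacement token contains a replaced character).
import Mathlib
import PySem

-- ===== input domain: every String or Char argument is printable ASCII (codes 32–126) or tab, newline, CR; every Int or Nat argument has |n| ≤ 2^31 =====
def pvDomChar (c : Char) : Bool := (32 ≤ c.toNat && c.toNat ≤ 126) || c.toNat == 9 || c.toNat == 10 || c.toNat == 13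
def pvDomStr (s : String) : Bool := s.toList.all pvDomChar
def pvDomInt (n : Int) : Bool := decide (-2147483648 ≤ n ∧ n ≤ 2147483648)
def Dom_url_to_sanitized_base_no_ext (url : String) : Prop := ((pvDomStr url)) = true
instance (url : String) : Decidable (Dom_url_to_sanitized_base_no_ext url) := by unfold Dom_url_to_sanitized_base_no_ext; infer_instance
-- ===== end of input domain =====

-- B replaces A's if/elif prefix chain by a first-match scan over an ordered prefix table, and
-- A's 13 sequential full-string replace passes by one left-to-right per-character table scan
-- (objective: alternative decomposition).


-- ===== PORT A =====
-- A's `replacements` dict, as its (key, value) item list in insertion order (ported on List Char).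
def pvReplacementsA : List (List Char × List Char) :=
  [ (['/'], "_SLASH_".toList), (['?'], "_QUERY_".toList), (['='], "_EQ_".toList),
    (['&'], "_AMP_".toList), (['%'], "_PCT_".toList), (['.'], "_DOT_".toList),
    ([':'], "_COLON_".toList), (['\\'], "_BACKSLASH_".toList), (['*'], "_STAR_".toList),
    (['"'], "_QUOTE_".toList), (['<'], "_LT_".toList), (['>'], "_GT_".toList),
    (['|'], "_PIPE_".toList) ]

def url_to_sanitized_base_no_ext (url : String) : String :=
  let cs := url.toList
  -- prefix if/elif chain (order matters, as in A); filename[len(p):] is slice cs (len p) none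
  let filename :=
    if PySem.Chars.startswith cs ("https://www.".toList) then
      "https_www_".toList ++ PySem.Chars.slice cs (some (("https://www.".toList.length : Int))) none
    else if PySem.Chars.startswith cs ("http://www.".toList) then
      "http_www_".toList ++ PySem.Chars.slice cs (some (("http://www.".toList.length : Int))) none
    else if PySem.Chars.startswith cs ("https://".toList) then
      "https_".toList ++ PySem.Chars.slice cs (some (("https://".toList.length : Int))) none
    else if PySem.Chars.startswith cs ("http://".toList) then
      "http_".toList ++ PySem.Chars.slice cs (some (("http://".toList.length : Int))) none
    else cs
  -- for char, token in replacements.items(): filename = filename.replace(char, token)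
  String.mk (pvReplacementsA.foldl (fun f p => PySem.Chars.replace f p.1 p.2) filename)

-- ===== PORT B =====
-- B's ordered prefix table.
def pvPrefixes : List (List Char × List Char) :=
  [ ("https://www.".toList, "https_www_".toList),
    ("http://www.".toList, "http_www_".toList),
    ("https://".toList, "https_".toList),
    ("http://".toList, "http_".toList) ]

-- for pre, rep in prefixes: if filename.startswith(pre): filename = rep + filename[len(pre):]; break
def pvApplyPrefix : List (List Char × List Char) → List Char → List Char
  | [], cs => cs
  | (pre, rep) :: rest, cs =>
      if PySem.Chars.startswith cs pre then
        rep ++ PySem.Chars.slice cs (some ((pre.length : Int))) none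
      else pvApplyPrefix rest cs

-- B's `table` dict (keys are 1-character strings, ported as Char).
def pvTableB : PySem.Dict Char (List Char) :=
  PySem.Dict.ofList
  [ ('/', "_SLASH_".toList), ('?', "_QUERY_".toList), ('=', "_EQ_".toList),
    ('&', "_AMP_".toList), ('%', "_PCT_".toList), ('.', "_DOT_".toList),
    (':', "_COLON_".toList), ('\\', "_BACKSLASH_".toList), ('*', "_STAR_".toList),
    ('"', "_QUOTE_".toList), ('<', "_LT_".toList), ('>', "_GT_".toList),
    ('|', "_PIPE_".toList) ]

def url_to_sanitized_base_no_ext_alt (url : String) : String :=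
  let filename := pvApplyPrefix pvPrefixes url.toList
  -- out = []; for ch in filename: out.extend(table.get(ch, ch)); "".join(out)
  let out := filename.foldl (fun out ch => out ++ pvTableB.getD ch [ch]) []
  String.mk out

-- ===== PRECONDITION & SPEC =====
def Spec_url_to_sanitized_base_no_ext (url : String) (out : String) : Prop := out = url_to_sanitized_base_no_ext_alt url
instance (url : String) (out : String) : Decidable (Spec_url_to_sanitized_base_no_ext url out) := by unfold Spec_url_to_sanitized_base_no_ext; infer_instance

-- ===== CLAIM (what is proved, stated in full; the proofs are below) =====
def Claim_equal_url_to_sanitized_base_no_ext : Prop := ∀ (url : String), Dom_url_to_sanitized_base_no_ext url → Spec_url_to_sanitized_base_no_ext url (url_to_sanitized_base_no_ext url)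

-- ===== LEMMAS AND PROOFS =====

-- replace with a single-character needle is a character-wise flatMap
theorem pvGoSingle (d : Char) (new : List Char) :
    ∀ (fuel : Nat) (l acc : List Char), l.length ≤ fuel →
    PySem.Chars.replace.go [d] new fuel l acc
      = acc.reverse ++ l.flatMap (fun c => if c = d then new else [c]) := by
  intro fuel
  induction fuel with
  | zero =>
    intro l acc h
    have hl : l = [] := List.eq_nil_of_length_eq_zero (Nat.le_zero.mp h)
    subst hl; simp [PySem.Chars.replace.go]
  | succ n ih =>
    intro l acc h
    cases l with
    | nil => simp [PySem.Chars.replace.go]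
    | cons c t =>
      simp only [PySem.Chars.replace.go]
      by_cases hc : c = d
      · subst hc
        simp only [List.isPrefixOf, BEq.rfl, Bool.true_and, if_true]
        rw [ih]
        · simp
        · simp at h ⊢; omega
      · have : [d].isPrefixOf (c :: t) = false := by
          simp [List.isPrefixOf, Ne.symm hc]
        rw [this]
        simp only [Bool.false_eq_true, if_false]
        rw [ih t (c :: acc) (by simp at h ⊢; omega)]
        simp [hc]

theorem pvReplaceSingle (s : List Char) (d : Char) (new : List Char) :
    PySem.Chars.replace s [d] new = s.flatMap (fun c => if c = d then new else [c]) := by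
  simp [PySem.Chars.replace, pvGoSingle d new s.length s [] le_rfl]

set_option maxHeartbeats 1000000 in
-- the heart: 13 sequential single-character replace passes = one simultaneous table map
theorem pvPasses (cs : List Char) :
    pvReplacementsA.foldl (fun f p => PySem.Chars.replace f p.1 p.2) cs
      = cs.flatMap (fun ch => pvTableB.getD ch [ch]) := by
  simp only [pvReplacementsA, List.foldl_cons, List.foldl_nil, pvReplaceSingle,
    List.flatMap_assoc]
  apply List.flatMap_congr
  intro c _
  by_cases h1 : c = '/';  · subst h1; rfl
  by_cases h2 : c = '?';  · subst h2; rfl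
  by_cases h3 : c = '=';  · subst h3; rfl
  by_cases h4 : c = '&';  · subst h4; rfl
  by_cases h5 : c = '%';  · subst h5; rfl
  by_cases h6 : c = '.';  · subst h6; rfl
  by_cases h7 : c = ':';  · subst h7; rfl
  by_cases h8 : c = '\\'; · subst h8; rfl
  by_cases h9 : c = '*';  · subst h9; rfl
  by_cases h10 : c = '"'; · subst h10; rfl
  by_cases h11 : c = '<'; · subst h11; rfl
  by_cases h12 : c = '>'; · subst h12; rfl
  by_cases h13 : c = '|'; · subst h13; rfl
  simp [PySem.Dict.getD, PySem.Dict.get?,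
    show pvTableB.items =
      [ ('/', "_SLASH_".toList), ('?', "_QUERY_".toList), ('=', "_EQ_".toList),
        ('&', "_AMP_".toList), ('%', "_PCT_".toList), ('.', "_DOT_".toList),
        (':', "_COLON_".toList), ('\\', "_BACKSLASH_".toList), ('*', "_STAR_".toList),
        ('"', "_QUOTE_".toList), ('<', "_LT_".toList), ('>', "_GT_".toList),
        ('|', "_PIPE_".toList) ] from rfl,
    beq_iff_eq, h1, h2, h3, h4, h5, h6, h7, h8, h9, h10, h11, h12, h13,
    Ne.symm h1, Ne.symm h2, Ne.symm h3, Ne.symm h4, Ne.symm h5, Ne.symm h6,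
    Ne.symm h7, Ne.symm h8, Ne.symm h9, Ne.symm h10, Ne.symm h11, Ne.symm h12, Ne.symm h13]

-- B's first-match prefix scan computes A's if/elif chain
theorem pvPrefixEq (cs : List Char) :
    pvApplyPrefix pvPrefixes cs =
    (if PySem.Chars.startswith cs ("https://www.".toList) then
      "https_www_".toList ++ PySem.Chars.slice cs (some (("https://www.".toList.length : Int))) none
    else if PySem.Chars.startswith cs ("http://www.".toList) then
      "http_www_".toList ++ PySem.Chars.slice cs (some (("http://www.".toList.length : Int))) none
    else if PySem.Chars.startswith cs ("https://".toList) then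
      "https_".toList ++ PySem.Chars.slice cs (some (("https://".toList.length : Int))) none
    else if PySem.Chars.startswith cs ("http://".toList) then
      "http_".toList ++ PySem.Chars.slice cs (some (("http://".toList.length : Int))) none
    else cs) := by
  simp only [pvPrefixes, pvApplyPrefix]

-- B's accumulating extend-loop is a flatMap
theorem pvFoldExtend (f : Char → List Char) :
    ∀ (cs acc : List Char),
    cs.foldl (fun out ch => out ++ f ch) acc = acc ++ cs.flatMap f := by
  intro cs
  induction cs with
  | nil => simp
  | cons c t ih => intro acc; simp [ih]

-- ===== VERDICT (by name: the statement is the Claim_ definition above) =====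
theorem url_to_sanitized_base_no_ext_spec : Claim_equal_url_to_sanitized_base_no_ext := by
  intro url _
  unfold Spec_url_to_sanitized_base_no_ext
  unfold url_to_sanitized_base_no_ext url_to_sanitized_base_no_ext_alt
  simp only [pvPrefixEq, pvPasses, pvFoldExtend, List.nil_append]
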